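-- pv_equiv track=rewrite | github.com/benny06917/hybrid-graph-rag-legal-intelligence-system | graph_rag/retrieval.py | rerank_facts
-- ===== SOURCE A (Python) =====
-- def rerank_facts(facts_text: str, query: str) -> str:
--     lines = [l.strip() for l in facts_text.split("\n") if l.strip() and l.strip() != "No graph relationships found for query entities."]
--     if not lines:
--         return facts_text
--
--     query_tokens = set(query.lower().split())
--
--     def _score(line: str) -> float:
--         return len(query_tokens & set(line.lower().split())) / max(len(query_tokens), 1)
--
--     reranked = sorted(lines, key=_score, reverse=True)
--     return "\n".join(reranked)
-- ===== SOURCE B (Python) =====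
-- def _overlap(query_tokens, line):
--     return len(query_tokens & set(line.lower().split()))
--
--
-- def rerank_facts(facts_text: str, query: str) -> str:
--     stripped = [l.strip() for l in facts_text.split("\n")]
--     lines = [l for l in stripped if l and l != "No graph relationships found for query entities."]
--     if not lines:
--         return facts_text
--
--     query_tokens = set(query.lower().split())
--
--     scored = [(_overlap(query_tokens, l), l) for l in lines]
--     order = sorted({c for c, _ in scored}, reverse=True)
--     return "\n".join(l for c in order for (cc, l) in scored if cc == c)
-- ===== Notes on version B (the rewrite author's own statement) =====
-- stated objective: alternative
-- what changed: Replaced the comparison sort keyed by a float score with a two-phase bucket pass: each line is decorated once with its integer query-token overlap, the distinct counts are sorted descending, and the output is emitted bucket by bucket in input order, reproducing the stable reverse sort exactly.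
import Mathlib
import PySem

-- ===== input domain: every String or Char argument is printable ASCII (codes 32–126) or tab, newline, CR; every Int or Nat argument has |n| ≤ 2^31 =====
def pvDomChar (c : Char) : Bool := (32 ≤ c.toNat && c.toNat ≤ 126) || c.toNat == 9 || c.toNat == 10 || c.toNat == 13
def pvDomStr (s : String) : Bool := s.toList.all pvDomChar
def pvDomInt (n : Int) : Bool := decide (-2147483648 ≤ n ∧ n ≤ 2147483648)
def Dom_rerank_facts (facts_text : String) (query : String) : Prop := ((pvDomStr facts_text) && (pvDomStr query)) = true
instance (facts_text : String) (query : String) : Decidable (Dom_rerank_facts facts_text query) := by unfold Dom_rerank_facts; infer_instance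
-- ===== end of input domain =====

-- B replaces A's stable reverse comparison sort keyed by a float score by a decorate/bucket pass:
-- lines are paired once with their integer overlap count and emitted per distinct count in
-- descending order (objective: alternative decomposition; same observable result).

-- ===== PORT A =====
-- The list comprehension with filter is ported as its single accumulating pass; Python's float
-- score count/max(len,1) is ported as the exact rational — the denominator is a fixed positive
-- constant, so every comparison the sort makes agrees with the Python float one.
def rerank_facts (facts_text : String) (query : String) : String :=
  -- split("\n"): separator is nonempty, so split? is some; .getD [] is exact here
  let lines := ((PySem.Str.split? facts_text "\n").getD []).foldl
    (fun acc l =>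
      if !(PySem.Str.strip l == "")
          && !(PySem.Str.strip l == "No graph relationships found for query entities.")
      then acc ++ [PySem.Str.strip l] else acc) []
  if lines = [] then facts_text
  else
    let query_tokens := PySem.Set.ofList (PySem.Str.split₀ (PySem.Str.lower query))
    let score : String → ℚ := fun line =>
      ((PySem.Set.len (PySem.Set.inter query_tokens
          (PySem.Set.ofList (PySem.Str.split₀ (PySem.Str.lower line)))) : Int) : ℚ)
        / ((max (PySem.Set.len query_tokens) 1 : Int) : ℚ)
    PySem.Str.join "\n" (PySem.List.sorted lines score true)

-- ===== PORT B =====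
def pvOverlap (query_tokens : PySem.Set String) (line : String) : Int :=
  PySem.Set.len (PySem.Set.inter query_tokens
    (PySem.Set.ofList (PySem.Str.split₀ (PySem.Str.lower line))))

def rerank_facts_alt (facts_text : String) (query : String) : String :=
  let stripped := ((PySem.Str.split? facts_text "\n").getD []).map PySem.Str.strip
  let lines := stripped.filter
    (fun s => !(s == "") && !(s == "No graph relationships found for query entities."))
  if lines = [] then facts_text
  else
    let query_tokens := PySem.Set.ofList (PySem.Str.split₀ (PySem.Str.lower query))
    let scored := lines.map (fun l => (pvOverlap query_tokens l, l))
    let order := PySem.List.sorted (PySem.Set.ofList (scored.map Prod.fst)) (fun k => k) true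
    PySem.Str.join "\n"
      (order.flatMap (fun c => (scored.filter (fun p => p.1 == c)).map Prod.snd))

-- ===== PRECONDITION & SPEC =====
def Spec_rerank_facts (facts_text : String) (query : String) (out : String) : Prop := out = rerank_facts_alt facts_text query
instance (facts_text : String) (query : String) (out : String) : Decidable (Spec_rerank_facts facts_text query out) := by unfold Spec_rerank_facts; infer_instance

-- ===== CLAIM (what is proved, stated in full; the proofs are below) =====
def Claim_equal_rerank_facts : Prop := ∀ (facts_text : String) (query : String), Dom_rerank_facts facts_text query → Spec_rerank_facts facts_text query (rerank_facts facts_text query)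

-- ===== LEMMAS AND PROOFS =====

-- A's accumulating comprehension pass = B's map-then-filter pipeline
theorem pv_foldl_eq_filter_map {α β : Type} (f : α → β) (p : β → Bool) (xs : List α) (acc : List β) :
    xs.foldl (fun acc l => if p (f l) then acc ++ [f l] else acc) acc
      = acc ++ (xs.map f).filter p := by
  induction xs generalizing acc with
  | nil => simp
  | cons a xs ih =>
    simp only [List.foldl_cons, List.map_cons, List.filter_cons]
    by_cases h : p (f a) = true
    · rw [if_pos h, ih, h]; simp
    · rw [if_neg h, ih]; simp [h]

-- insertBy passes over a block it never goes before
theorem pv_insertBy_skip {α : Type} (p : α → α → Bool) (x : α) (l1 l2 : List α)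
    (h : ∀ y ∈ l1, p x y = false) :
    PySem.List.insertBy p x (l1 ++ l2) = l1 ++ PySem.List.insertBy p x l2 := by
  induction l1 with
  | nil => simp
  | cons a l ih =>
    have ha : p x a = false := h a (List.mem_cons_self ..)
    simp [PySem.List.insertBy, ha, ih (fun y hy => h y (List.mem_cons_of_mem _ hy))]

-- insertBy goes to the front when it precedes everything
theorem pv_insertBy_front {α : Type} (p : α → α → Bool) (x : α) (l : List α)
    (h : ∀ y ∈ l, p x y = true) :
    PySem.List.insertBy p x l = x :: l := by
  cases l with
  | nil => rfl
  | cons a l => simp [PySem.List.insertBy, h a (List.mem_cons_self ..)]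

-- one stable-descending insertion step on the bucket decomposition
theorem pv_bucket_insert {α : Type} (c : α → Int) (ks : List Int)
    (hdesc : ks.Pairwise (fun a b => b < a)) (x : α) (hx : c x ∈ ks) (ys : List α) :
    PySem.List.insertBy (fun a b => decide (c b < c a)) x
        (ks.flatMap (fun k => ys.filter (fun y => c y == k)))
      = ks.flatMap (fun k => (ys ++ [x]).filter (fun y => c y == k)) := by
  induction ks with
  | nil => simp at hx
  | cons k ks ih =>
    have hlt : ∀ b ∈ ks, b < k := (List.pairwise_cons.mp hdesc).1
    have hdesc' := (List.pairwise_cons.mp hdesc).2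
    have hmem_rest : ∀ y ∈ ks.flatMap (fun k => ys.filter (fun y => c y == k)), c y < k := by
      intro y hy
      rcases List.mem_flatMap.mp hy with ⟨k', hk', hy'⟩
      have := (List.mem_filter.mp hy').2
      have : c y = k' := by simpa using this
      exact this ▸ hlt k' hk'
    by_cases h : c x = k
    · have hskip : ∀ y ∈ ys.filter (fun y => c y == k), (fun a b => decide (c b < c a)) x y = false := by
        intro y hy
        have : c y = k := by simpa using (List.mem_filter.mp hy).2
        simp [this, h]
      rw [List.flatMap_cons, pv_insertBy_skip _ _ _ _ hskip,
        pv_insertBy_front _ _ _ (by intro y hy; simpa [h] using hmem_rest y hy)]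
      have hrest : ∀ k' ∈ ks, ((ys ++ [x]).filter (fun y => c y == k')) = ys.filter (fun y => c y == k') := by
        intro k' hk'
        have : ¬ (c x = k') := by have := hlt k' hk'; omega
        simp [List.filter_append, this]
      rw [List.flatMap_cons]
      have hmz : ks.flatMap (fun k => (ys ++ [x]).filter (fun y => c y == k))
          = ks.flatMap (fun k => ys.filter (fun y => c y == k)) :=
        List.flatMap_congr (by intro k' hk'; rw [hrest k' hk'])
      rw [hmz]
      simp [List.filter_append, h]
    · have hx' : c x ∈ ks := by
        rcases List.mem_cons.mp hx with h' | h'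
        · exact absurd h' h
        · exact h'
      have hxk : c x < k := hlt _ hx'
      have hskip : ∀ y ∈ ys.filter (fun y => c y == k), (fun a b => decide (c b < c a)) x y = false := by
        intro y hy
        have : c y = k := by simpa using (List.mem_filter.mp hy).2
        simp [this]; omega
      rw [List.flatMap_cons, pv_insertBy_skip _ _ _ _ hskip, ih hdesc' hx', List.flatMap_cons]
      have : ((ys ++ [x]).filter (fun y => c y == k)) = ys.filter (fun y => c y == k) := by
        simp [List.filter_append, h]
      rw [this]

-- the stable descending sort IS the bucket concatenation in descending key order
theorem pv_sorted_rev_eq_flatMap {α : Type} (c : α → Int) (ks : List Int)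
    (hdesc : ks.Pairwise (fun a b => b < a)) (xs : List α) (hmem : ∀ y ∈ xs, c y ∈ ks) :
    PySem.List.sorted xs c true = ks.flatMap (fun k => xs.filter (fun y => c y == k)) := by
  induction xs using List.reverseRecOn with
  | nil =>
    have h0 : ks.flatMap (fun (_ : Int) => ([] : List α)) = [] := by
      induction ks <;> simp_all
    simp [PySem.List.sorted, h0]
  | append_singleton ys x ih =>
    have hmem' : ∀ y ∈ ys, c y ∈ ks := fun y hy => hmem y (List.mem_append_left _ hy)
    rw [PySem.List.sorted_rev_eq_foldl_insertBy, List.foldl_append]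
    simp only [List.foldl_cons, List.foldl_nil]
    rw [← PySem.List.sorted_rev_eq_foldl_insertBy, ih hmem',
      pv_bucket_insert c ks hdesc x (hmem x (by simp)) ys]

-- scaling the Int key by a fixed positive denominator does not change the sort
theorem pv_sorted_div {α : Type} (xs : List α) (c : α → Int) (D : Int) (hD : 0 < D) :
    PySem.List.sorted xs (fun x => ((c x : ℚ) / (D : ℚ))) true = PySem.List.sorted xs c true := by
  rw [PySem.List.sorted_rev_eq_foldl_insertBy, PySem.List.sorted_rev_eq_foldl_insertBy]
  have hDq : (0 : ℚ) < (D : ℚ) := by exact_mod_cast hD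
  have : (fun (a b : α) => decide ((c b : ℚ) / (D : ℚ) < (c a : ℚ) / (D : ℚ)))
      = (fun (a b : α) => decide (c b < c a)) := by
    funext a b
    simp [div_lt_div_iff_of_pos_right hDq, Int.cast_lt]
  rw [this]

-- the whole non-empty-lines branch
theorem pv_core (lines : List String) (c : String → Int) (qlen : Int) :
    PySem.List.sorted lines (fun line => ((c line : Int) : ℚ) / ((max qlen 1 : Int) : ℚ)) true
      = (PySem.List.sorted (PySem.Set.ofList ((lines.map (fun l => (c l, l))).map Prod.fst))
          (fun k => k) true).flatMap
        (fun k => ((lines.map (fun l => (c l, l))).filter (fun p => p.1 == k)).map Prod.snd) := by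
  have hD : (0 : Int) < max qlen 1 := lt_of_lt_of_le one_pos (le_max_right _ 1)
  rw [pv_sorted_div lines c _ hD]
  set order := PySem.List.sorted (PySem.Set.ofList ((lines.map (fun l => (c l, l))).map Prod.fst))
    (fun k => k) true with horder
  have hnd : order.Nodup :=
    (PySem.List.sorted_perm _ _ _).nodup_iff.mpr (PySem.Set.nodup_ofList _)
  have hle : order.Pairwise (fun a b => b ≤ a) := PySem.List.sorted_pairwise_rev _ _
  have hdesc : order.Pairwise (fun a b => b < a) := by
    refine (hle.and hnd).imp ?_
    rintro a b ⟨h1, h2⟩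
    exact lt_of_le_of_ne h1 (Ne.symm h2)
  have hmem : ∀ y ∈ lines, c y ∈ order := by
    intro y hy
    rw [horder, PySem.List.mem_sorted, PySem.Set.mem_ofList]
    simp only [List.map_map]
    exact List.mem_map_of_mem hy
  rw [pv_sorted_rev_eq_flatMap c order hdesc lines hmem]
  refine List.flatMap_congr ?_
  intro k _
  rw [List.filter_map, List.map_map]
  have : (Prod.snd ∘ fun l : String => (c l, l)) = id := rfl
  rw [this, List.map_id]
  rfl

-- ===== VERDICT (by name: the statement is the Claim_ definition above) =====
theorem rerank_facts_spec : Claim_equal_rerank_facts := by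
  intro facts_text query _
  unfold Spec_rerank_facts
  simp only [rerank_facts, rerank_facts_alt, pvOverlap,
    pv_foldl_eq_filter_map PySem.Str.strip
      (fun s => !(s == "") && !(s == "No graph relationships found for query entities.")),
    List.nil_append]
  split_ifs with h
  · rfl
  · exact congrArg (PySem.Str.join "\n") (pv_core _ _ _)
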